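-- pv_equiv track=rewrite | github.com/ishandutta2007/codeforces | kude/normal/1427/D.py | sf
-- ===== SOURCE A (Python) =====
-- def sf(a, d):
--     s = [0]
--     for di in d:
--         s.append(s[-1] + di)
--     rv = []
--     for i in range(len(d) - 1, -1, -1):
--         rv += a[s[i]:s[i+1]]
--     return rv
-- ===== SOURCE B (Python) =====
-- def sf(a, d):
--     # Divide and conquer: concatenate the blocks of the right half (shifted by the
--     # left half's total) before the blocks of the left half; depth is O(log len(d)).
--     def go(start, ds):
--         if not ds:
--             return []
--         if len(ds) == 1:
--             return a[start:start + ds[0]]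
--         mid = len(ds) // 2
--         left, right = ds[:mid], ds[mid:]
--         return go(start + sum(left), right) + go(start, left)
--     return go(0, d)
-- ===== Notes on version B (the rewrite author's own statement) =====
-- stated objective: alternative
-- what changed: Replaced A's two staged passes (build a prefix-sum array, then a descending-index loop slicing a[s[i]:s[i+1]]) by a divide-and-conquer recursion: split d in half, emit the right half's blocks (offset by the left half's sum) before the left half's, with a direct slice at a singleton.
import Mathlib
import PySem

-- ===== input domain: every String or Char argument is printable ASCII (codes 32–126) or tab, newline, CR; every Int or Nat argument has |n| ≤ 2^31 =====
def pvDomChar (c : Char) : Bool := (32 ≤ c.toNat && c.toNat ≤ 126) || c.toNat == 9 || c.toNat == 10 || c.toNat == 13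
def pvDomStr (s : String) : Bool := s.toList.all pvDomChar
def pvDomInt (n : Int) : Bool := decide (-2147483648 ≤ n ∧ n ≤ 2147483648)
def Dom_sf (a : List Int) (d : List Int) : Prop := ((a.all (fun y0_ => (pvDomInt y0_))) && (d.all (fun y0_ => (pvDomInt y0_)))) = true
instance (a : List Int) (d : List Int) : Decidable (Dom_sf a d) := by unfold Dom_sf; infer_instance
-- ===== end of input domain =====

-- B replaces A's two staged passes (prefix-sum array, then descending-index slicing) by a
-- divide-and-conquer recursion on d (objective: alternative — not faster).

-- ===== PORT A =====
-- s.append(s[-1] + di): s is nonempty throughout, so Python's s[-1] never raises;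
-- pyGetD ... (-1) 0 is exact here (the default 0 is never taken).
def sfScan (s : List Int) (di : Int) : List Int :=
  s ++ [PySem.List.pyGetD s (-1) 0 + di]

def sf (a : List Int) (d : List Int) : List Int :=
  let s := d.foldl sfScan [0]
  -- s[i], s[i+1]: indices 0 ≤ i ≤ len(d) < len(s), so Python never raises; pyGetD is exact.
  (PySem.List.pyRange ((d.length : Int) - 1) (-1) (-1)).foldl
    (fun rv i => rv ++ PySem.List.slice a (some (PySem.List.pyGetD s i 0))
                                          (some (PySem.List.pyGetD s (i + 1) 0))) []

-- ===== PORT B =====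
-- go(start, ds) of Source B. ds[:mid] / ds[mid:] with the Nat mid = len(ds)//2 are exactly
-- List.take mid / List.drop mid (PySem.List.slice_to_natCast / slice_from_natCast);
-- len(ds)//2 on a Nat is Nat division, exact for Python's //.
def sfGo (a : List Int) (start : Int) : List Int → List Int
  | [] => []
  | [d0] => PySem.List.slice a (some start) (some (start + d0))
  | x :: y :: t =>
      let mid := (x :: y :: t).length / 2
      sfGo a (start + ((x :: y :: t).take mid).sum) ((x :: y :: t).drop mid) ++
        sfGo a start ((x :: y :: t).take mid)
termination_by ds => ds.length
decreasing_by
  · simp; omega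
  · simp; omega

def sf_alt (a : List Int) (d : List Int) : List Int := sfGo a 0 d

-- ===== PRECONDITION & SPEC =====
def Spec_sf (a : List Int) (d : List Int) (out : List Int) : Prop := out = sf_alt a d
instance (a : List Int) (d : List Int) (out : List Int) : Decidable (Spec_sf a d out) := by unfold Spec_sf; infer_instance

-- ===== CLAIM (what is proved, stated in full; the proofs are below) =====
def Claim_equal_sf : Prop := ∀ (a : List Int) (d : List Int), Dom_sf a d → Spec_sf a d (sf a d)

-- ===== LEMMAS AND PROOFS =====

-- the common characterisation: the list of blocks of a cut by d starting at offset t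
def chunks (a : List Int) : Int → List Int → List (List Int)
  | _, [] => []
  | t, di :: ds => PySem.List.slice a (some t) (some (t + di)) :: chunks a (t + di) ds

theorem chunks_split (a : List Int) (l : List Int) : ∀ (r : List Int) (t : Int),
    chunks a t (l ++ r) = chunks a t l ++ chunks a (t + l.sum) r := by
  induction l with
  | nil => intro r t; simp [chunks]
  | cons di l ih =>
      intro r t
      simp only [List.cons_append, chunks, ih, List.sum_cons]
      rw [show t + (di + l.sum) = t + di + l.sum by ring]

-- prefix sums as a recursive list: psums t d = [t, t+d0, t+d0+d1, ...]
def psums : Int → List Int → List Int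
  | t, [] => [t]
  | t, di :: d => t :: psums (t + di) d

theorem foldl_sfScan_eq (d : List Int) : ∀ (l : List Int) (t : Int),
    d.foldl sfScan (l ++ [t]) = l ++ psums t d := by
  induction d with
  | nil => intro l t; simp [psums]
  | cons di d ih =>
      intro l t
      have h1 : sfScan (l ++ [t]) di = (l ++ [t]) ++ [t + di] := by
        simp [sfScan, PySem.List.pyGetD_neg_one_append_singleton]
      calc (di :: d).foldl sfScan (l ++ [t])
          = d.foldl sfScan ((l ++ [t]) ++ [t + di]) := by rw [List.foldl_cons, h1]
        _ = (l ++ [t]) ++ psums (t + di) d := ih (l ++ [t]) (t + di)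
        _ = l ++ psums t (di :: d) := by simp [psums]

theorem sfold_eq (d : List Int) : d.foldl sfScan [0] = psums 0 d := by
  simpa using foldl_sfScan_eq d [] 0

theorem psums_length (d : List Int) : ∀ t, (psums t d).length = d.length + 1 := by
  induction d with
  | nil => intro t; simp [psums]
  | cons di d ih => intro t; simp [psums, ih]

theorem psums_getD (d : List Int) : ∀ (t : Int) (i : Nat), i ≤ d.length →
    (psums t d).getD i 0 = t + (d.take i).sum := by
  induction d with
  | nil =>
      intro t i hi
      have h0 : i = 0 := Nat.le_zero.mp hi
      subst h0; simp [psums]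
  | cons di d ih =>
      intro t i hi
      cases i with
      | zero => simp [psums]
      | succ j =>
          have hj : j ≤ d.length := by simpa using hi
          simp only [psums, List.getD_cons_succ, ih (t + di) j hj,
            List.take_succ_cons, List.sum_cons]
          ring

theorem psums_append (d : List Int) (x : Int) :
    psums 0 (d ++ [x]) = psums 0 d ++ [d.sum + x] := by
  suffices h : ∀ t, psums t (d ++ [x]) = psums t d ++ [t + d.sum + x] by simpa using h 0
  induction d with
  | nil => intro t; simp [psums]
  | cons di d ih => intro t; simp [psums, ih (t + di)]; ring_nf

-- descending range: range(n, -1, -1) peels its head n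
theorem pyRange_desc_head (n : Nat) :
    PySem.List.pyRange (n : Int) (-1) (-1) = (n : Int) :: PySem.List.pyRange ((n : Int) - 1) (-1) (-1) := by
  simp only [PySem.List.pyRange]
  rw [if_neg (show ¬((-1 : Int) = 0) by norm_num), if_neg (show ¬((-1 : Int) = 0) by norm_num),
    if_neg (show ¬((0 : Int) < -1) by norm_num), if_neg (show ¬((0 : Int) < -1) by norm_num),
    if_pos (show (-1 : Int) < (n : Int) by omega)]
  have hc1 : (((n : Int) - -1 + - -1 - 1) / - -1).toNat = n + 1 := by norm_num
  rw [hc1, List.range_succ_eq_map, List.map_cons, List.map_map]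
  by_cases h : (-1 : Int) < (n : Int) - 1
  · rw [if_pos h]
    have hc2 : (((n : Int) - 1 - -1 + - -1 - 1) / - -1).toNat = n := by norm_num
    rw [hc2]
    refine congrArg₂ _ (by ring) (List.map_congr_left ?_)
    intro k _
    simp only [Function.comp_apply]
    push_cast
    ring
  · rw [if_neg h]
    have hn0 : n = 0 := by omega
    subst hn0
    simp

theorem pyRange_desc_mem (n : Nat) : ∀ i : Int,
    i ∈ PySem.List.pyRange ((n : Int) - 1) (-1) (-1) → 0 ≤ i ∧ i < n := by
  induction n with
  | zero =>
      intro i hi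
      have he : PySem.List.pyRange ((0 : Int) - 1) (-1) (-1) = [] := by
        norm_num [PySem.List.pyRange]
      norm_num [he] at hi
  | succ m ih =>
      intro i hi
      have hn : ((m + 1 : Nat) : Int) - 1 = (m : Int) := by push_cast; ring
      rw [hn, pyRange_desc_head m] at hi
      rcases List.mem_cons.mp hi with rfl | h
      · refine ⟨by positivity, by exact_mod_cast Nat.lt_succ_self m⟩
      · obtain ⟨h0, h1⟩ := ih i h
        exact ⟨h0, by push_cast; omega⟩

-- A's rv-fold: the accumulator factors out
theorem foldl_slice_acc (a s : List Int) (l : List Int) : ∀ acc : List Int,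
    l.foldl (fun rv i => rv ++ PySem.List.slice a (some (PySem.List.pyGetD s i 0))
        (some (PySem.List.pyGetD s (i + 1) 0))) acc =
    acc ++ l.foldl (fun rv i => rv ++ PySem.List.slice a (some (PySem.List.pyGetD s i 0))
        (some (PySem.List.pyGetD s (i + 1) 0))) [] := by
  induction l with
  | nil => intro acc; simp
  | cons i l ih =>
      intro acc
      rw [List.foldl_cons, List.foldl_cons, ih, ih
        ([] ++ PySem.List.slice a (some (PySem.List.pyGetD s i 0))
          (some (PySem.List.pyGetD s (i + 1) 0)))]
      simp

-- A's rv-fold only looks at s at the visited indices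
theorem foldl_slice_congr (a s₁ s₂ : List Int) (l : List Int)
    (h : ∀ i ∈ l, PySem.List.pyGetD s₁ i 0 = PySem.List.pyGetD s₂ i 0 ∧
        PySem.List.pyGetD s₁ (i + 1) 0 = PySem.List.pyGetD s₂ (i + 1) 0) :
    ∀ acc : List Int,
    l.foldl (fun rv i => rv ++ PySem.List.slice a (some (PySem.List.pyGetD s₁ i 0))
        (some (PySem.List.pyGetD s₁ (i + 1) 0))) acc =
    l.foldl (fun rv i => rv ++ PySem.List.slice a (some (PySem.List.pyGetD s₂ i 0))
        (some (PySem.List.pyGetD s₂ (i + 1) 0))) acc := by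
  induction l with
  | nil => intro acc; simp
  | cons i l ih =>
      intro acc
      obtain ⟨h1, h2⟩ := h i List.mem_cons_self
      rw [List.foldl_cons, List.foldl_cons]
      simp only [h1, h2]
      exact ih (fun j hj => h j (List.mem_cons_of_mem _ hj)) _

-- A appends the last block first, then behaves like A on d
theorem sf_snoc (a d : List Int) (x : Int) :
    sf a (d ++ [x]) = PySem.List.slice a (some d.sum) (some (d.sum + x)) ++ sf a d := by
  have hs : (d ++ [x]).foldl sfScan [0] = psums 0 d ++ [d.sum + x] := by
    rw [sfold_eq, psums_append]
  have hlen : ((d ++ [x]).length : Int) - 1 = (d.length : Int) := by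
    simp only [List.length_append, List.length_cons, List.length_nil]
    push_cast
    ring
  have hgetD : ∀ i : Nat, i ≤ d.length →
      PySem.List.pyGetD (psums 0 d ++ [d.sum + x]) (i : Int) 0 =
      PySem.List.pyGetD (psums 0 d) (i : Int) 0 := by
    intro i hi
    have hl : i < (psums 0 d).length := by rw [psums_length]; omega
    rw [PySem.List.pyGetD_natCast, PySem.List.pyGetD_natCast,
      List.getD_eq_getElem?_getD, List.getD_eq_getElem?_getD,
      List.getElem?_append_left hl]
  have htop : PySem.List.pyGetD (psums 0 d ++ [d.sum + x]) ((d.length : Nat) : Int) 0 = d.sum := by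
    rw [hgetD d.length le_rfl, PySem.List.pyGetD_natCast, psums_getD d 0 d.length le_rfl]
    simp
  have htop1 : PySem.List.pyGetD (psums 0 d ++ [d.sum + x]) (((d.length : Nat) : Int) + 1) 0
      = d.sum + x := by
    have hc : ((d.length : Int) + 1) = ((d.length + 1 : Nat) : Int) := by push_cast; ring
    have hl : (psums 0 d).length ≤ d.length + 1 := by rw [psums_length]
    rw [hc, PySem.List.pyGetD_natCast, List.getD_eq_getElem?_getD,
      List.getElem?_append_right hl, psums_length]
    simp
  have hcongr : ∀ i ∈ PySem.List.pyRange ((d.length : Int) - 1) (-1) (-1),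
      PySem.List.pyGetD (psums 0 d ++ [d.sum + x]) i 0 = PySem.List.pyGetD (psums 0 d) i 0 ∧
      PySem.List.pyGetD (psums 0 d ++ [d.sum + x]) (i + 1) 0 =
        PySem.List.pyGetD (psums 0 d) (i + 1) 0 := by
    intro i hi
    obtain ⟨h0, hlt⟩ := pyRange_desc_mem d.length i hi
    obtain ⟨k, rfl⟩ : ∃ k : Nat, i = (k : Int) := ⟨i.toNat, by omega⟩
    have hk : k < d.length := by exact_mod_cast hlt
    have hc : ((k : Int) + 1) = ((k + 1 : Nat) : Int) := by push_cast; ring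
    exact ⟨hgetD k (by omega), by rw [hc, hgetD (k + 1) (by omega)]⟩
  simp only [sf, hs, hlen, pyRange_desc_head d.length, List.foldl_cons, sfold_eq]
  rw [htop, htop1, foldl_slice_congr a (psums 0 d ++ [d.sum + x]) (psums 0 d) _ hcongr,
    foldl_slice_acc]
  simp

-- A computes the reversed concatenation of the blocks
theorem sf_eq_chunks (a : List Int) : ∀ d : List Int,
    sf a d = (chunks a 0 d).reverse.flatten := by
  intro d
  induction d using List.reverseRecOn with
  | nil =>
      have hA : sf a [] = [] := by
        simp only [sf]
        have he : PySem.List.pyRange ((([] : List Int).length : Int) - 1) (-1) (-1) = [] := by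
          norm_num [PySem.List.pyRange]
        rw [he]
        simp
      rw [hA]; simp [chunks]
  | append_singleton d x ih =>
      rw [sf_snoc, ih, chunks_split a d [x] 0]
      simp [chunks]

-- B computes the same reversed concatenation
theorem sfGo_eq_chunks (a : List Int) : ∀ (start : Int) (ds : List Int),
    sfGo a start ds = (chunks a start ds).reverse.flatten := by
  intro start ds
  induction start, ds using sfGo.induct with
  | case1 start => simp [sfGo, chunks]
  | case2 start d0 => simp [sfGo, chunks]
  | case3 start x y t mid ihr ihl =>
      rw [sfGo, ihr, ihl]
      have h := chunks_split a ((x :: y :: t).take ((x :: y :: t).length / 2))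
        ((x :: y :: t).drop ((x :: y :: t).length / 2)) start
      rw [List.take_append_drop] at h
      simp only [List.length_cons] at h ⊢
      rw [h]
      simp [mid]

-- ===== VERDICT (by name: the statement is the Claim_ definition above) =====
theorem sf_spec : Claim_equal_sf := by
  intro a d _
  unfold Spec_sf
  rw [sf_eq_chunks, sf_alt, sfGo_eq_chunks a 0 d]
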